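-- pv_equiv track=rewrite | github.com/tylergneill/vatayana | IR_tools.py | list2linkingDict
-- ===== SOURCE A (Python) =====
-- def list2linkingDict(elem_list):
--     L = len(elem_list)
--     linking_dict = {}
--     linking_dict[elem_list[0]] = {'prev': elem_list[L-1], 'next': elem_list[1]}
--     for i in range(1, L-1):
--         linking_dict[elem_list[i]] = {'prev': elem_list[i-1], 'next': elem_list[i+1]}
--     linking_dict[elem_list[L-1]] = {'prev': elem_list[L-2], 'next': elem_list[0]}
--     return linking_dict
-- ===== SOURCE B (Python) =====
-- def list2linkingDict(elem_list):
--     prevs = elem_list[-1:] + elem_list[:-1]   # rotate right by one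
--     nexts = elem_list[1:] + elem_list[:1]     # rotate left by one
--     return {k: {'prev': p, 'next': n} for k, p, n in zip(elem_list, prevs, nexts)}
-- ===== Notes on version B (the rewrite author's own statement) =====
-- stated objective: simpler
-- what changed: Instead of indexed construction with special-cased first/middle/last entries, B builds two rotated copies of the list with slicing and zips the list with them into a dict comprehension, so no index arithmetic or boundary cases remain.
-- outside the precondition, e.g. on list2linkingDict([]): A raises IndexError, B returns {}; on list2linkingDict(['a']): A raises IndexError, B returns {'a': {'prev': 'a', 'next': 'a'}}
-- crash fix: On lists of length < 2 A raises IndexError (elem_list[0] on the empty list, the hard-coded elem_list[1] on a singleton); B returns {} for [] and a self-linking entry for a singleton. — e.g. on list2linkingDict(["a"]): A raises IndexError, B returns [("a", [("prev", "a"), ("next", "a")])]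
import Mathlib
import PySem

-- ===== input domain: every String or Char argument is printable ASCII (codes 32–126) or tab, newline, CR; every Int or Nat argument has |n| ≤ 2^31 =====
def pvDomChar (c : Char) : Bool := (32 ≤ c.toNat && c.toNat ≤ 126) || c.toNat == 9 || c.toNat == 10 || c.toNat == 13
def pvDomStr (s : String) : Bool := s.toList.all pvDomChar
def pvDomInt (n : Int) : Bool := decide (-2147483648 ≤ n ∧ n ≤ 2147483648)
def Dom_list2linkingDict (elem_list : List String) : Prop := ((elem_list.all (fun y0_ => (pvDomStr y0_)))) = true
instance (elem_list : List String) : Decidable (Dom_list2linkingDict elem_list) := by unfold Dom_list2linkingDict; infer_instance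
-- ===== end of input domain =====

-- B builds the circular prev/next dict by zipping the list with its two one-step
-- rotations (made by slicing) instead of A's indexed first/middle/last construction
-- (objective: simpler); A and B agree on all lists of length ≥ 2.

-- ===== PORT A =====
-- elem_list[i]; Pre_ guarantees every access A performs is in range, so the "" default is never taken inside Pre_
def pvGet (xs : List String) (i : Int) : String := (PySem.List.pyGet? xs i).getD ""

def list2linkingDict (elem_list : List String) : List (String × List (String × String)) :=
  let L : Int := elem_list.length
  let d : PySem.Dict String (List (String × String)) := PySem.Dict.empty
  let d := d.insert (pvGet elem_list 0) [("prev", pvGet elem_list (L-1)), ("next", pvGet elem_list 1)]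
  let d := (PySem.List.pyRange 1 (L-1) 1).foldl (fun d i =>
      d.insert (pvGet elem_list i) [("prev", pvGet elem_list (i-1)), ("next", pvGet elem_list (i+1))]) d
  let d := d.insert (pvGet elem_list (L-1)) [("prev", pvGet elem_list (L-2)), ("next", pvGet elem_list 0)]
  d.items

-- ===== PORT B =====
def list2linkingDict_alt (elem_list : List String) : List (String × List (String × String)) :=
  let prevs := PySem.List.slice elem_list (some (-1)) none ++ PySem.List.slice elem_list none (some (-1))
  let nexts := PySem.List.slice elem_list (some 1) none ++ PySem.List.slice elem_list none (some 1)
  ((elem_list.zip (prevs.zip nexts)).foldl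
      (fun d kpn => d.insert kpn.1 [("prev", kpn.2.1), ("next", kpn.2.2)])
      (PySem.Dict.empty : PySem.Dict String (List (String × String)))).items

-- ===== PRECONDITION & SPEC =====
-- A performs elem_list[0], elem_list[1] and elem_list[L-1]: it raises IndexError on lists of length < 2
def Pre_list2linkingDict (elem_list : List String) : Prop := 2 ≤ elem_list.length
instance (elem_list : List String) : Decidable (Pre_list2linkingDict elem_list) := by unfold Pre_list2linkingDict; infer_instance
def pvWitness_list2linkingDict : List String := ["a", "b", "c"]

-- On lists of length < 2 A raises IndexError while B returns: {} on [] and a self-linking single entry on a singleton.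
def Raises_list2linkingDict (elem_list : List String) : Prop := elem_list.length < 2
instance (elem_list : List String) : Decidable (Raises_list2linkingDict elem_list) := by unfold Raises_list2linkingDict; infer_instance
def pvRaiseWitness_list2linkingDict : List String := ["a"]
def pvRaiseWitnessOut_list2linkingDict : List (String × List (String × String)) := [("a", [("prev", "a"), ("next", "a")])]

def Spec_list2linkingDict (elem_list : List String) (out : List (String × List (String × String))) : Prop := out = list2linkingDict_alt elem_list
instance (elem_list : List String) (out : List (String × List (String × String))) : Decidable (Spec_list2linkingDict elem_list out) := by unfold Spec_list2linkingDict; infer_instance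

-- ===== CLAIM (what is proved, stated in full; the proofs are below) =====
def Claim_equal_list2linkingDict : Prop := ∀ (elem_list : List String), Dom_list2linkingDict elem_list → Pre_list2linkingDict elem_list → Spec_list2linkingDict elem_list (list2linkingDict elem_list)
def Claim_raises_list2linkingDict : Prop := (∀ (elem_list : List String), Dom_list2linkingDict elem_list → Raises_list2linkingDict elem_list → ¬ Pre_list2linkingDict elem_list) ∧ (Dom_list2linkingDict (pvRaiseWitness_list2linkingDict) ∧ Raises_list2linkingDict (pvRaiseWitness_list2linkingDict) ∧ list2linkingDict_alt (pvRaiseWitness_list2linkingDict) = pvRaiseWitnessOut_list2linkingDict)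

-- ===== LEMMAS AND PROOFS =====

-- the common fold step: insert one (key, prev, next) triple
def pvIns (d : PySem.Dict String (List (String × String))) (t : String × String × String) :
    PySem.Dict String (List (String × String)) :=
  d.insert t.1 [("prev", t.2.1), ("next", t.2.2)]

-- the triple A inserts for index i
def pvTriple (xs : List String) (i : Int) : String × String × String :=
  (pvGet xs i, pvGet xs (i-1), pvGet xs (i+1))

theorem pvGet_eq_getElem (xs : List String) (k : Nat) (hk : k < xs.length) :
    pvGet xs (k : Int) = xs[k] := by
  simp [pvGet, PySem.List.pyGet?, PySem.List.pyIdx?, hk]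

-- A's sequence of inserted triples, read off A's three parts
theorem entriesA (xs : List String) :
    list2linkingDict xs =
      (PySem.Dict.empty.insert
        (pvGet xs 0) [("prev", pvGet xs ((xs.length : Int)-1)), ("next", pvGet xs 1)]
        |> (fun d => ((PySem.List.pyRange 1 ((xs.length : Int)-1) 1).map (fun i => pvTriple xs i)).foldl pvIns d)
        |> (fun d => pvIns d (pvGet xs ((xs.length : Int)-1), pvGet xs ((xs.length : Int)-2), pvGet xs 0))).items := by
  simp only [list2linkingDict, List.foldl_map, pvIns, pvTriple]

-- the zipped triple list B folds over equals A's triple sequence (length ≥ 2)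
theorem zip_eq_triples (xs : List String) (h : 2 ≤ xs.length) :
    xs.zip (((PySem.List.slice xs (some (-1)) none ++ PySem.List.slice xs none (some (-1))).zip
             (PySem.List.slice xs (some 1) none ++ PySem.List.slice xs none (some 1))))
    = (pvGet xs 0, pvGet xs ((xs.length : Int)-1), pvGet xs 1)
      :: ((PySem.List.pyRange 1 ((xs.length : Int)-1) 1).map (fun i => pvTriple xs i)
      ++ [(pvGet xs ((xs.length : Int)-1), pvGet xs ((xs.length : Int)-2), pvGet xs 0)]) := by
  rw [PySem.List.slice_from_neg_one, PySem.List.slice_to_neg_one,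
      show PySem.List.slice xs (some 1) none = xs.drop 1 from PySem.List.slice_from_natCast xs 1,
      show PySem.List.slice xs none (some 1) = xs.take 1 from PySem.List.slice_to_natCast xs 1]
  have hlen : ((xs.length : Int) - 1 - 1).toNat = xs.length - 2 := by omega
  apply List.ext_getElem
  · simp [PySem.List.length_pyRange_one, hlen]; omega
  · intro k hk1 hk2
    have hn : k < xs.length := by simp [List.length_zip] at hk1; omega
    rw [List.getElem_zip, List.getElem_zip]
    have hprev : (xs.drop (xs.length - 1) ++ xs.dropLast)[k]'(by simp; omega)
        = if k = 0 then xs[xs.length - 1]'(by omega) else xs[k-1]'(by omega) := by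
      split_ifs with hk
      · subst hk
        rw [List.getElem_append_left (by simp; omega)]
        simp [List.getElem_drop]
      · rw [List.getElem_append_right (by simp; omega)]
        simp only [List.getElem_dropLast]
        congr 1
        simp
        omega
    have hnext : (xs.drop 1 ++ xs.take 1)[k]'(by simp only [List.length_append, List.length_drop, List.length_take]; omega)
        = if hk : k < xs.length - 1 then xs[k+1]'(by omega) else xs[0]'(by omega) := by
      split_ifs with hk
      · rw [List.getElem_append_left (by simp; omega)]
        simp
      · rw [List.getElem_append_right (by simp; omega)]
        have h0 : k - (List.drop 1 xs).length = 0 := by simp; omega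
        simp only [h0, List.getElem_take]
    rw [hprev, hnext]
    rcases Nat.eq_zero_or_pos k with hk0 | hkpos
    · subst hk0
      rw [if_pos rfl, dif_pos (by omega), List.getElem_cons_zero]
      refine Prod.ext ?_ (Prod.ext ?_ ?_)
      · simpa using (pvGet_eq_getElem xs 0 (by omega)).symm
      · have := pvGet_eq_getElem xs (xs.length - 1) (by omega)
        rw [show ((xs.length - 1 : Nat) : Int) = (xs.length : Int) - 1 by omega] at this
        simpa using this.symm
      · simpa using (pvGet_eq_getElem xs 1 (by omega)).symm
    · obtain ⟨j, rfl⟩ : ∃ j, k = j + 1 := ⟨k - 1, by omega⟩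
      rw [if_neg (by omega), List.getElem_cons_succ]
      by_cases hj : j < xs.length - 2
      · rw [dif_pos (by omega), List.getElem_append_left (by simp [PySem.List.length_pyRange_one, hlen]; omega)]
        rw [List.getElem_map]
        rw [PySem.List.getElem_pyRange_one]
        simp only [pvTriple]
        refine Prod.ext ?_ (Prod.ext ?_ ?_)
        · have := pvGet_eq_getElem xs (j+1) (by omega)
          rw [show ((j+1 : Nat) : Int) = 1 + (j : Int) by omega] at this
          simpa using this.symm
        · have := pvGet_eq_getElem xs j (by omega)
          rw [show ((j : Nat) : Int) = 1 + (j : Int) - 1 by omega] at this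
          simpa using this.symm
        · have := pvGet_eq_getElem xs (j+2) (by omega)
          rw [show ((j+2 : Nat) : Int) = 1 + (j : Int) + 1 by omega] at this
          simpa using this.symm
      · have hj2 : j = xs.length - 2 := by omega
        rw [dif_neg (by omega), List.getElem_append_right (by simp [PySem.List.length_pyRange_one, hlen]; omega)]
        simp only [List.getElem_singleton]
        refine Prod.ext ?_ (Prod.ext ?_ ?_)
        · have := pvGet_eq_getElem xs (j+1) hn
          rw [show ((j+1 : Nat) : Int) = (xs.length : Int) - 1 by omega] at this
          exact this.symm
        · have := pvGet_eq_getElem xs (j+1-1) (by omega)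
          rw [show ((j+1-1 : Nat) : Int) = (xs.length : Int) - 2 by omega] at this
          exact this.symm
        · simpa using (pvGet_eq_getElem xs 0 (by omega)).symm

theorem list2linkingDict_spec : Claim_equal_list2linkingDict := by
  intro xs _ hpre
  unfold Pre_list2linkingDict at hpre
  unfold Spec_list2linkingDict
  rw [entriesA xs]
  simp only [list2linkingDict_alt]
  rw [zip_eq_triples xs hpre]
  simp only [List.foldl_cons, List.foldl_append, List.foldl_map, List.foldl_nil, pvIns, pvTriple]

-- ===== VERDICT (by name: the statement is the Claim_ definition above) =====
theorem list2linkingDict_raises : Claim_raises_list2linkingDict := by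
  unfold Claim_raises_list2linkingDict
  constructor
  · intro xs _ hr hp
    unfold Raises_list2linkingDict at hr
    unfold Pre_list2linkingDict at hp
    omega
  · exact ⟨by decide, by decide, by decide⟩

-- witness self-check: the raise-region witness value is exactly what B's port returns there
theorem pvRaiseWitness_ok : list2linkingDict_alt pvRaiseWitness_list2linkingDict = pvRaiseWitnessOut_list2linkingDict :=
  list2linkingDict_raises.2.2.2
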